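-- pv_equiv track=rewrite | github.com/scottjones03/QEC-Lib | src/qectostim/decoders/circuit_level_decoder.py | _get_flag_pattern_for_block
-- ===== SOURCE A (Python) =====
-- from typing import Dict, List, Optional, Tuple, Any, Set, TYPE_CHECKING
--
-- def _get_flag_pattern_for_block(
--
--     flag_outcomes: Dict[str, Dict[int, Dict[int, int]]],
--     stab_type: str,
--     block_id: int,
-- ) -> Tuple[int, ...]:
--     """
--     Get the flag pattern for a block as a tuple.
--
--     Returns tuple of flag values ordered by stabilizer index.
--     """
--     if stab_type not in flag_outcomes or block_id not in flag_outcomes[stab_type]: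
--         return ()
--
--     stab_dict = flag_outcomes[stab_type][block_id]
--     if not stab_dict:
--         return ()
--
--     max_stab_idx = max(stab_dict.keys())
--     return tuple(stab_dict.get(i, 0) for i in range(max_stab_idx + 1))
-- ===== SOURCE B (Python) =====
-- def _get_flag_pattern_for_block(
--     flag_outcomes,
--     stab_type,
--     block_id,
-- ):
--     """Sort-then-scan: walk the entries in increasing index order, emitting the
--     zero gap before each index, instead of probing the dict for every index of
--     range(max+1).  Indices below 0 never appear in the 0..max pattern."""
--     if stab_type not in flag_outcomes or block_id not in flag_outcomes[stab_type]:
--         return ()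
--     stab_dict = flag_outcomes[stab_type][block_id]
--     if not stab_dict:
--         return ()
--     out = []
--     prev = -1
--     for idx, val in sorted(stab_dict.items(), key=lambda kv: kv[0]):
--         if idx < 0:
--             continue
--         out.extend([0] * (idx - prev - 1))
--         out.append(val)
--         prev = idx
--     return tuple(out)
-- ===== Notes on version B (the rewrite author's own statement) =====
-- stated objective: alternative
-- what changed: Replaces the gather over every index of range(max+1) (one dict probe per index) by sort-then-scan: sort the entries by index once, then walk them emitting the run of zeros before each index and the value itself, so only the k entries are visited after the sort.
import Mathlib
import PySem

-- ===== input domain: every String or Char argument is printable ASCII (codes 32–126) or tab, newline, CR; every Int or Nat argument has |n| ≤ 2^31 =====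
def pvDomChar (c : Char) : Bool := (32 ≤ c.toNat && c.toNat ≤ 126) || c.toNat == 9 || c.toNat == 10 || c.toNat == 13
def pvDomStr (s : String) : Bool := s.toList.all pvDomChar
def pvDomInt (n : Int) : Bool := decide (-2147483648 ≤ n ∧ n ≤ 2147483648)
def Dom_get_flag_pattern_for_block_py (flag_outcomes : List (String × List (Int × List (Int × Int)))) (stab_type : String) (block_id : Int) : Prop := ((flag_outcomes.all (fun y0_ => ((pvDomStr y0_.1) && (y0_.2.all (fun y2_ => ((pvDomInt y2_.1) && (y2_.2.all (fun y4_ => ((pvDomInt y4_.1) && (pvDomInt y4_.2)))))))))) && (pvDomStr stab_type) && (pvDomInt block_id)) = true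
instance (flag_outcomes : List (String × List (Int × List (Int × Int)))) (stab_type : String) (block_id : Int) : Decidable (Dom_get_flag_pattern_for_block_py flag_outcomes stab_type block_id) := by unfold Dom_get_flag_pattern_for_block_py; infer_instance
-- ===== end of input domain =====

-- B replaces A's per-index gather (probe the dict with .get(i,0) for every i of range(max+1))
-- by sort-then-scan: sort the entries by index, then emit each gap-run of zeros and the value.

-- ===== PORT A =====
-- gather: for each i in range(max_stab_idx+1), stab_dict.get(i, 0)
def get_flag_pattern_for_block_py (flag_outcomes : List (String × List (Int × List (Int × Int)))) (stab_type : String) (block_id : Int) : List Int :=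
  match flag_outcomes.lookup stab_type with
  | none => []
  | some mid =>
    match mid.lookup block_id with
    | none => []
    | some stab_dict =>
      if stab_dict = [] then []
      else
        match PySem.List.max? (stab_dict.map Prod.fst) (fun x => x) with
        | none => []   -- unreachable: stab_dict ≠ []
        | some m =>
          (PySem.List.pyRange 0 (m + 1) 1).map (fun i => (stab_dict.lookup i).getD 0)

-- ===== PORT B =====
-- sort by index, then scan: out.extend([0]*(idx-prev-1)); out.append(val); prev = idx
def get_flag_pattern_for_block_py_alt (flag_outcomes : List (String × List (Int × List (Int × Int)))) (stab_type : String) (block_id : Int) : List Int :=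
  match flag_outcomes.lookup stab_type with
  | none => []
  | some mid =>
    match mid.lookup block_id with
    | none => []
    | some stab_dict =>
      if stab_dict = [] then []
      else
        ((PySem.List.sorted stab_dict (fun kv => kv.1) false).foldl
          (fun (acc : List Int × Int) p =>
            if p.1 < 0 then acc
            else (acc.1 ++ List.replicate (p.1 - acc.2 - 1).toNat 0 ++ [p.2], p.1))
          ([], -1)).1

-- ===== PRECONDITION & SPEC =====
-- Pre_ excludes association lists carrying duplicate keys at some dict level: a Python dict
-- cannot hold them, so which of two equal-keyed pairs counts (first vs last match) is an
-- accident of the list encoding, not a behaviour of A.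
def Pre_get_flag_pattern_for_block_py (flag_outcomes : List (String × List (Int × List (Int × Int)))) (stab_type : String) (block_id : Int) : Prop :=
  (flag_outcomes.map Prod.fst).Nodup ∧
  ∀ p ∈ flag_outcomes, (p.2.map Prod.fst).Nodup ∧ ∀ q ∈ p.2, (q.2.map Prod.fst).Nodup
instance (flag_outcomes : List (String × List (Int × List (Int × Int)))) (stab_type : String) (block_id : Int) : Decidable (Pre_get_flag_pattern_for_block_py flag_outcomes stab_type block_id) := by unfold Pre_get_flag_pattern_for_block_py; infer_instance

def pvWitness_get_flag_pattern_for_block_py : (List (String × List (Int × List (Int × Int)))) × String × Int :=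
  ([("X", [(0, [(0, 1), (2, 3)])])], "X", 0)

def Spec_get_flag_pattern_for_block_py (flag_outcomes : List (String × List (Int × List (Int × Int)))) (stab_type : String) (block_id : Int) (out : List Int) : Prop := out = get_flag_pattern_for_block_py_alt flag_outcomes stab_type block_id
instance (flag_outcomes : List (String × List (Int × List (Int × Int)))) (stab_type : String) (block_id : Int) (out : List Int) : Decidable (Spec_get_flag_pattern_for_block_py flag_outcomes stab_type block_id out) := by unfold Spec_get_flag_pattern_for_block_py; infer_instance

-- ===== CLAIM (what is proved, stated in full; the proofs are below) =====
def Claim_equal_get_flag_pattern_for_block_py : Prop := ∀ (flag_outcomes : List (String × List (Int × List (Int × Int)))) (stab_type : String) (block_id : Int), Dom_get_flag_pattern_for_block_py flag_outcomes stab_type block_id → Pre_get_flag_pattern_for_block_py flag_outcomes stab_type block_id → Spec_get_flag_pattern_for_block_py flag_outcomes stab_type block_id (get_flag_pattern_for_block_py flag_outcomes stab_type block_id)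

-- ===== LEMMAS AND PROOFS =====

-- last key of the scan (prev if the list is empty)
def pvLastKey : List (Int × Int) → Int → Int
  | [], prev => prev
  | p :: t, _ => pvLastKey t p.1

-- a successful assoc-list lookup hits a member pair
theorem pv_lookup_mem {κ ν : Type} [BEq κ] [LawfulBEq κ] (l : List (κ × ν)) (a : κ) (b : ν)
    (h : l.lookup a = some b) : (a, b) ∈ l := by
  induction l with
  | nil => simp [List.lookup] at h
  | cons p t ih =>
    rw [List.lookup_cons] at h
    split at h
    · next hk =>
      cases p with | mk x y =>
        simp only [Option.some.injEq] at h
        simp at hk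
        subst hk h
        exact List.mem_cons_self
    · right; exact ih h

-- a member pair is found by lookup when the keys are Nodup
theorem pv_mem_lookup {κ ν : Type} [BEq κ] [LawfulBEq κ] (l : List (κ × ν)) (a : κ) (b : ν)
    (hnd : (l.map Prod.fst).Nodup) (h : (a, b) ∈ l) : l.lookup a = some b := by
  induction l with
  | nil => simp at h
  | cons p t ih =>
    rw [List.map_cons, List.nodup_cons] at hnd
    rw [List.lookup_cons]
    rcases List.mem_cons.mp h with he | ht
    · subst he; simp
    · split
      · next hk =>
        exact absurd (eq_of_beq hk ▸ List.mem_map_of_mem (f := Prod.fst) ht) hnd.1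
      · exact ih hnd.2 ht

-- a key absent from the key column looks up to none
theorem pv_lookup_none {κ ν : Type} [BEq κ] [LawfulBEq κ] (l : List (κ × ν)) (a : κ)
    (h : a ∉ l.map Prod.fst) : l.lookup a = none := by
  induction l with
  | nil => rfl
  | cons p t ih =>
    rw [List.map_cons, List.mem_cons] at h
    push Not at h
    rw [List.lookup_cons]
    split
    · next hk => exact absurd (eq_of_beq hk) h.1
    · exact ih h.2

-- permuting an assoc list with Nodup keys does not change lookups
theorem pv_lookup_perm {κ ν : Type} [BEq κ] [LawfulBEq κ] (l l' : List (κ × ν))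
    (hp : l.Perm l') (hnd : (l.map Prod.fst).Nodup) (a : κ) : l.lookup a = l'.lookup a := by
  have hnd' : (l'.map Prod.fst).Nodup := ((hp.map Prod.fst).nodup_iff).mp hnd
  cases h : l.lookup a with
  | none =>
    rw [eq_comm]
    apply pv_lookup_none
    intro hm
    rcases List.mem_map.mp hm with ⟨q, hq, hqa⟩
    have : q ∈ l := hp.symm.subset hq
    have := pv_mem_lookup l a q.2 hnd (by cases q; simp at hqa; subst hqa; exact this)
    simp [h] at this
  | some b =>
    exact (pv_mem_lookup l' a b hnd' (hp.subset (pv_lookup_mem l a b h))).symm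

-- a fold that skips entries failing a test is the fold over the filtered list
theorem pv_foldl_skip {α β : Type} (c : β → Prop) [DecidablePred c] (g : α → β → α) (l : List β) :
    ∀ (init : α),
      l.foldl (fun a p => if c p then a else g a p) init
        = (l.filter (fun p => !decide (c p))).foldl g init := by
  induction l with
  | nil => intro init; rfl
  | cons p t ih =>
    intro init
    rw [List.foldl_cons, List.filter_cons]
    by_cases hc : c p
    · simp [hc, ih]
    · simp [hc, ih, List.foldl_cons]

-- lastKey is at least prev when the keys strictly increase and all exceed prev
theorem pv_lastKey_ge (t : List (Int × Int)) :
    t.Pairwise (fun a b => a.1 < b.1) →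
    ∀ (prev : Int), (∀ p ∈ t, prev < p.1) → prev ≤ pvLastKey t prev := by
  induction t with
  | nil => intro _ prev _; exact le_refl _
  | cons p r ih =>
    intro hp prev h
    rw [List.pairwise_cons] at hp
    have h1 : prev < p.1 := h p List.mem_cons_self
    have h2 : p.1 ≤ pvLastKey r p.1 := ih hp.2 p.1 hp.1
    calc prev ≤ p.1 := le_of_lt h1
      _ ≤ pvLastKey r p.1 := h2
      _ = pvLastKey (p :: r) prev := rfl

-- lastKey of a nonempty list is one of the keys
theorem pv_lastKey_mem (t : List (Int × Int)) :
    ∀ (prev : Int), t ≠ [] → pvLastKey t prev ∈ t.map Prod.fst := by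
  induction t with
  | nil => intro prev h; exact absurd rfl h
  | cons p r ih =>
    intro prev _
    by_cases hr : r = []
    · subst hr; simp [pvLastKey]
    · exact List.mem_cons_of_mem _ (ih p.1 hr)

-- every key of a strictly key-increasing list is at most its lastKey
theorem pv_lastKey_ub (t : List (Int × Int)) (hp : t.Pairwise (fun a b => a.1 < b.1)) :
    ∀ (prev : Int) (k : Int), k ∈ t.map Prod.fst → k ≤ pvLastKey t prev := by
  induction t with
  | nil => intro prev k hk; simp at hk
  | cons p r ih =>
    rw [List.pairwise_cons] at hp
    intro prev k hk
    rcases List.mem_cons.mp hk with he | ht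
    · subst he
      exact pv_lastKey_ge r hp.2 p.1 (fun q hq => hp.1 q hq)
    · exact ih hp.2 p.1 k ht

-- the gap-filling scan over a strictly key-increasing list equals the per-index gather
theorem pv_gapfill (t : List (Int × Int)) (hp : t.Pairwise (fun a b => a.1 < b.1)) :
    ∀ (acc : List Int) (prev : Int), (∀ p ∈ t, prev < p.1) →
      (t.foldl
        (fun (a : List Int × Int) p =>
          (a.1 ++ List.replicate (p.1 - a.2 - 1).toNat 0 ++ [p.2], p.1))
        (acc, prev)).1
      = acc ++ (PySem.List.pyRange (prev + 1) (pvLastKey t prev + 1) 1).map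
          (fun i => (t.lookup i).getD 0) := by
  induction t with
  | nil =>
    intro acc prev _
    simp [pvLastKey, PySem.List.pyRange_one_eq_nil (by omega : prev + 1 ≤ prev + 1)]
  | cons p r ih =>
    rw [List.pairwise_cons] at hp
    intro acc prev h
    have hprev : prev < p.1 := h p List.mem_cons_self
    have hgt : ∀ q ∈ r, p.1 < q.1 := hp.1
    have hL : p.1 ≤ pvLastKey r p.1 := pv_lastKey_ge r hp.2 p.1 hgt
    rw [List.foldl_cons]
    show (r.foldl _ (acc ++ List.replicate (p.1 - prev - 1).toNat 0 ++ [p.2], p.1)).1 = _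
    rw [ih hp.2 _ p.1 hgt]
    have hsplit : PySem.List.pyRange (prev + 1) (pvLastKey (p :: r) prev + 1) 1
        = PySem.List.pyRange (prev + 1) p.1 1 ++ PySem.List.pyRange p.1 (p.1 + 1) 1
          ++ PySem.List.pyRange (p.1 + 1) (pvLastKey r p.1 + 1) 1 := by
      show PySem.List.pyRange (prev + 1) (pvLastKey r p.1 + 1) 1 = _
      rw [← PySem.List.pyRange_one_append (prev + 1) p.1 (p.1 + 1) (by omega) (by omega)]
      rw [← PySem.List.pyRange_one_append (prev + 1) (p.1 + 1) (pvLastKey r p.1 + 1) (by omega) (by omega)]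
    rw [hsplit, List.map_append, List.map_append]
    rw [PySem.List.pyRange_one_singleton]
    have hmid : [p.1].map (fun i => (((p :: r).lookup i).getD 0)) = [p.2] := by
      cases p; simp [List.lookup]
    have hlow : (PySem.List.pyRange (prev + 1) p.1 1).map (fun i => (((p :: r).lookup i).getD 0))
        = List.replicate (p.1 - prev - 1).toNat 0 := by
      have hall : ∀ x ∈ (PySem.List.pyRange (prev + 1) p.1 1).map
          (fun i => (((p :: r).lookup i).getD 0)), x = (0 : Int) := by
        intro x hx
        rcases List.mem_map.mp hx with ⟨i, hi, rfl⟩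
        rw [PySem.List.mem_pyRange_one] at hi
        rw [pv_lookup_none]
        · rfl
        · intro hm
          rcases List.mem_cons.mp hm with he | hr
          · omega
          · rcases List.mem_map.mp hr with ⟨q, hq, hqi⟩
            have := hgt q hq
            omega
      rw [List.eq_replicate_of_mem hall, List.length_map,
        PySem.List.length_pyRange_one]
      congr 1
      omega
    have hhigh : (PySem.List.pyRange (p.1 + 1) (pvLastKey r p.1 + 1) 1).map
          (fun i => (((p :: r).lookup i).getD 0))
        = (PySem.List.pyRange (p.1 + 1) (pvLastKey r p.1 + 1) 1).map
          (fun i => ((r.lookup i).getD 0)) := by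
      apply List.map_congr_left
      intro i hi
      rw [PySem.List.mem_pyRange_one] at hi
      rw [List.lookup_cons]
      split
      · next hk =>
        have := eq_of_beq hk
        omega
      · rfl
    rw [hmid, hlow, hhigh]
    simp [List.append_assoc]

-- ===== VERDICT (by name: the statement is the Claim_ definition above) =====
-- filtering out entries whose key differs from a does not change lookup a
theorem pv_lookup_filter (c : (Int × Int) → Bool) (a : Int) :
    ∀ (l : List (Int × Int)), (∀ p ∈ l, c p = false → p.1 ≠ a) →
      (l.filter c).lookup a = l.lookup a := by
  intro l
  induction l with
  | nil => intro _; rfl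
  | cons p rest ih =>
    intro h
    have hrest : ∀ q ∈ rest, c q = false → q.1 ≠ a :=
      fun q hq => h q (List.mem_cons_of_mem _ hq)
    rw [List.filter_cons]
    by_cases hc : c p = true
    · rw [if_pos hc, List.lookup_cons, List.lookup_cons]
      split
      · rfl
      · exact ih hrest
    · rw [if_neg (by simp [hc])]
      have hne : p.1 ≠ a := h p List.mem_cons_self (by simpa using hc)
      rw [List.lookup_cons]
      split
      · next hk => exact absurd (eq_of_beq hk).symm hne
      · exact ih hrest

-- the filtered-sorted list: Nodup keys transfer, strict pairwise, key sets, lastKey = max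
theorem pv_core (sd : List (Int × Int)) (m : Int)
    (hnd : (sd.map Prod.fst).Nodup)
    (hmax : PySem.List.max? (sd.map Prod.fst) (fun x => x) = some m) :
    ((PySem.List.sorted sd (fun kv => kv.1) false).foldl
        (fun (acc : List Int × Int) p =>
          if p.1 < 0 then acc
          else (acc.1 ++ List.replicate (p.1 - acc.2 - 1).toNat 0 ++ [p.2], p.1))
        ([], -1)).1
      = (PySem.List.pyRange 0 (m + 1) 1).map (fun i => (sd.lookup i).getD 0) := by
  set s := PySem.List.sorted sd (fun kv => kv.1) false with hs
  have hperm : s.Perm sd := PySem.List.sorted_perm sd _ false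
  have hnds : (s.map Prod.fst).Nodup := ((hperm.map Prod.fst).nodup_iff).mpr hnd
  have hple : s.Pairwise (fun a b => a.1 ≤ b.1) := PySem.List.sorted_pairwise sd _
  have hne : s.Pairwise (fun a b => a.1 ≠ b.1) := by
    have := hnds
    rw [List.Nodup, List.pairwise_map] at this
    exact this
  have hplt : s.Pairwise (fun a b => a.1 < b.1) :=
    (hple.and hne).imp (fun h => lt_of_le_of_ne h.1 h.2)
  rw [pv_foldl_skip (fun p => p.1 < 0) _ s]
  set t := s.filter (fun p => !decide (p.1 < 0)) with ht
  have htp : t.Pairwise (fun a b => a.1 < b.1) := hplt.filter _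
  have htpos : ∀ p ∈ t, (0 : Int) ≤ p.1 := by
    intro p hp
    have := (List.mem_filter.mp hp).2
    simpa using this
  have h0 : ∀ p ∈ t, (-1 : Int) < p.1 := fun p hp => by have := htpos p hp; omega
  rw [pv_gapfill t htp [] (-1) h0, List.nil_append]
  have hmm : m ∈ sd.map Prod.fst := by
    have := PySem.List.max?_mem (xs := sd.map Prod.fst) (key := fun x => x) hmax
    exact this
  have hub : ∀ k ∈ sd.map Prod.fst, k ≤ m := by
    intro k hk
    exact PySem.List.max?_isMax (xs := sd.map Prod.fst) (key := fun x => x) hmax k hk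
  have hskeys : ∀ k, k ∈ s.map Prod.fst ↔ k ∈ sd.map Prod.fst := by
    intro k
    exact (hperm.map Prod.fst).mem_iff
  have htkeys : ∀ k, k ∈ t.map Prod.fst ↔ (k ∈ s.map Prod.fst ∧ 0 ≤ k) := by
    intro k
    constructor
    · intro hk
      rcases List.mem_map.mp hk with ⟨q, hq, rfl⟩
      exact ⟨List.mem_map_of_mem (List.mem_of_mem_filter hq), htpos q hq⟩
    · rintro ⟨hk, hk0⟩
      rcases List.mem_map.mp hk with ⟨q, hq, rfl⟩
      exact List.mem_map_of_mem (List.mem_filter.mpr ⟨hq, by simpa using hk0⟩)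
  by_cases hm0 : m < 0
  · -- all keys negative: t = [] and both sides are []
    have htnil : t = [] := by
      rw [List.filter_eq_nil_iff]
      intro q hq
      have : q.1 ≤ m := hub q.1 ((hskeys q.1).mp (List.mem_map_of_mem hq))
      simp
      omega
    rw [htnil]
    show List.map _ (PySem.List.pyRange 0 (pvLastKey [] (-1) + 1) 1) = _
    rw [show pvLastKey [] (-1) = -1 from rfl]
    rw [PySem.List.pyRange_one_eq_nil (by omega), PySem.List.pyRange_one_eq_nil (by omega)]
    rfl
  · -- m ≥ 0: the last scanned key is m and the lookups agree on 0..m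
    push Not at hm0
    have hmt : m ∈ t.map Prod.fst := (htkeys m).mpr ⟨(hskeys m).mpr hmm, hm0⟩
    have htne : t ≠ [] := by
      intro h; rw [h] at hmt; simp at hmt
    have hLmem : pvLastKey t (-1) ∈ t.map Prod.fst := pv_lastKey_mem t (-1) htne
    have hLle : pvLastKey t (-1) ≤ m := by
      apply hub
      exact (hskeys _).mp ((htkeys _).mp hLmem).1
    have hLge : m ≤ pvLastKey t (-1) := pv_lastKey_ub t htp (-1) m hmt
    have hL : pvLastKey t (-1) = m := le_antisymm hLle hLge
    rw [hL]
    apply List.map_congr_left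
    intro i hi
    rw [PySem.List.mem_pyRange_one] at hi
    have hlk1 : (s.filter (fun p => !decide (p.1 < 0))).lookup i = s.lookup i := by
      apply pv_lookup_filter
      intro p _ hc
      simp at hc
      omega
    rw [← ht] at hlk1
    rw [hlk1, pv_lookup_perm s sd hperm hnds i]

-- ===== VERDICT (by name: the statement is the Claim_ definition above) =====
theorem get_flag_pattern_for_block_py_spec : Claim_equal_get_flag_pattern_for_block_py := by
  intro fo st bid _hdom hpre
  unfold Spec_get_flag_pattern_for_block_py
  cases h1 : fo.lookup st with
  | none => simp [get_flag_pattern_for_block_py, get_flag_pattern_for_block_py_alt, h1]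
  | some mid =>
    cases h2 : mid.lookup bid with
    | none => simp [get_flag_pattern_for_block_py, get_flag_pattern_for_block_py_alt, h1, h2]
    | some sd =>
      by_cases hsd : sd = []
      · simp [get_flag_pattern_for_block_py, get_flag_pattern_for_block_py_alt, h1, h2, hsd]
      · cases hmax : PySem.List.max? (sd.map Prod.fst) (fun x => x) with
        | none =>
          rw [PySem.List.max?_eq_none_iff] at hmax
          exact absurd (List.map_eq_nil_iff.mp hmax) hsd
        | some m =>
          have hnd : (sd.map Prod.fst).Nodup :=
            (hpre.2 _ (pv_lookup_mem fo st mid h1)).2 _ (pv_lookup_mem mid bid sd h2)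
          simp only [get_flag_pattern_for_block_py, get_flag_pattern_for_block_py_alt,
            h1, h2, if_neg hsd, hmax]
          exact (pv_core sd m hnd hmax).symm
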